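-- pv_equiv track=rewrite | github.com/tourmii/soni-voice-assistant | src/glados/tui.py | _is_safe_position
-- ===== SOURCE A (Python) =====
-- def _is_safe_position(text: str, pos: int) -> bool:
--     """Check if slicing the text at pos results in balanced markup."""
--     stack = []
--     i = 0
--     while i < pos:
--         if text[i] == '[':
--             if i + 1 < len(text) and text[i + 1] == '/':
--                 # Closing tag
--                 j = i + 2
--                 tag = ''
--                 while j < len(text) and text[j] != ']':
--                     tag += text[j]
--                     j += 1
--                 if stack and stack[-1] == tag:
--                     stack.pop()
--                 i = j
--             else:
--                 # Opening tag
--                 j = i + 1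
--                 tag = ''
--                 while j < len(text) and text[j] != ']':
--                     tag += text[j]
--                     j += 1
--                 stack.append(tag)
--                 i = j
--         else:
--             i += 1
--     return len(stack) == 0
-- ===== SOURCE B (Python) =====
-- def _is_safe_position(text: str, pos: int) -> bool:
--     """Check if slicing the text at pos results in balanced markup."""
--     def tokens():
--         i = text.find('[')
--         while i != -1:
--             is_close = text.startswith('/', i + 1)
--             body = i + 2 if is_close else i + 1
--             end = text.find(']', body)
--             if end == -1:
--                 yield i, is_close, text[body:]
--                 return
--             yield i, is_close, text[body:end]
--             i = text.find('[', end + 1)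
--
--     stack = []
--     for start, is_close, name in tokens():
--         if start >= pos:
--             break
--         if is_close:
--             if stack and stack[-1] == name:
--                 stack.pop()
--         else:
--             stack.append(name)
--     return not stack
-- ===== Notes on version B (the rewrite author's own statement) =====
-- stated objective: alternative
-- what changed: Replaces the hand-rolled index-juggling character scanner with a find-based tokenizer generator that yields (start, is_close, name) tag tokens, consumed by a separate stack fold that breaks at the first tag starting at or after pos.
import Mathlib
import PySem

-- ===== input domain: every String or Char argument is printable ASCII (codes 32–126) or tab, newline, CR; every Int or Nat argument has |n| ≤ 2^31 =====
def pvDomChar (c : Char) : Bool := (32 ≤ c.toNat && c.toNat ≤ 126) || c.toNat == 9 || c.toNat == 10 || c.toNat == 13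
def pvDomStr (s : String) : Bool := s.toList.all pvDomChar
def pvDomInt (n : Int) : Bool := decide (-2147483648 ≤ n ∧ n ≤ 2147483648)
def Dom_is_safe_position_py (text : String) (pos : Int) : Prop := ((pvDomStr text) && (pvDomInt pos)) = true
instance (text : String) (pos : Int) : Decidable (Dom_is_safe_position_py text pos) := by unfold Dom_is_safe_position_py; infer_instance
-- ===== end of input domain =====

-- B replaces A's hand-rolled per-character scanner by a find-based tokenizer (yielding
-- (start, is_close, name) tags) consumed by a stack fold with an early break: a different
-- decomposition of the same O(n) scan (measured constant-factor faster in Python).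

-- ===== PORT A =====

-- Python's inner `while j < len(text) and text[j] != ']': tag += text[j]; j += 1`:
-- returns the scanned tag (as List Char) and the final j.
def pvScanTag (cs : List Char) (j : Nat) : List Char × Nat :=
  if h : j < cs.length then
    if cs[j] = ']' then ([], j)
    else
      ((cs[j] :: (pvScanTag cs (j + 1)).1), (pvScanTag cs (j + 1)).2)
  else ([], j)
termination_by cs.length - j

theorem pvScanTag_ge (cs : List Char) (j : Nat) : j ≤ (pvScanTag cs j).2 := by
  fun_induction pvScanTag <;> simp_all <;> omega

-- Python's outer `while i < pos` loop; `none` from cs[i]? is Python's IndexError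
-- (reachable only outside Pre_, where we return an arbitrary false).
def pvALoop (cs : List Char) (pos : Int) (stack : List (List Char)) (i : Nat) : Bool :=
  if (i : Int) < pos then
    match cs[i]? with
    | none => false
    | some c =>
      if c = '[' then
        if cs[i + 1]? = some '/' then
          -- closing tag
          let p := pvScanTag cs (i + 2)
          let stack' := if stack.head? = some p.1 then stack.tail else stack
          pvALoop cs pos stack' p.2
        else
          -- opening tag
          let p := pvScanTag cs (i + 1)
          pvALoop cs pos (p.1 :: stack) p.2
      else
        pvALoop cs pos stack (i + 1)
  else
    stack.isEmpty
termination_by (pos - i).toNat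
decreasing_by
  · have h1 := pvScanTag_ge cs (i + 2); omega
  · have h1 := pvScanTag_ge cs (i + 1); omega
  · omega

def is_safe_position_py (text : String) (pos : Int) : Bool :=
  pvALoop text.toList pos [] 0

-- ===== PORT B =====

-- B's tokenizer generator: scan (find) for '[', classify via the '/' test, take the
-- name up to ']' (or to end of text), and continue after the ']'; idx tracks the
-- absolute start index of the remaining suffix `l` in the whole text.
def pvTokens (l : List Char) (idx : Nat) : List (Nat × Bool × List Char) :=
  match l with
  | [] => []
  | c :: rest =>
    if c = '[' then
      match rest with
      | '/' :: r =>
        let name := r.takeWhile (· ≠ ']')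
        (idx, true, name) ::
          (match h2 : r.dropWhile (· ≠ ']') with
           | _ :: r2 => pvTokens r2 (idx + 3 + name.length)
           | [] => [])
      | other =>
        let name := other.takeWhile (· ≠ ']')
        (idx, false, name) ::
          (match h2 : other.dropWhile (· ≠ ']') with
           | _ :: r2 => pvTokens r2 (idx + 2 + name.length)
           | [] => [])
    else pvTokens rest (idx + 1)
termination_by l.length
decreasing_by
  · have hl := List.length_dropWhile_le (p := (· ≠ ']')) r
    rw [h2] at hl; simp at hl ⊢; omega
  · have hl := List.length_dropWhile_le (p := (· ≠ ']')) other
    rw [h2] at hl; rename_i hother _; simp at hl ⊢; omega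
  · simp

-- B's per-token stack update (the body of B's `for` loop).
def pvStep (st : List (List Char)) (t : Nat × Bool × List Char) : List (List Char) :=
  if t.2.1 then
    match st with
    | top :: r => if top = t.2.2 then r else st
    | [] => st
  else t.2.2 :: st

def is_safe_position_py_alt (text : String) (pos : Int) : Bool :=
  (((pvTokens text.toList 0).takeWhile (fun t => (t.1 : Int) < pos)).foldl pvStep []).isEmpty

-- ===== PRECONDITION & SPEC =====
-- Pre_ excludes exactly the inputs with pos > len(text), on which Python A raises IndexError.
def Pre_is_safe_position_py (text : String) (pos : Int) : Prop :=
  pos ≤ (text.length : Int)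
instance (text : String) (pos : Int) : Decidable (Pre_is_safe_position_py text pos) := by
  unfold Pre_is_safe_position_py; infer_instance

def pvWitness_is_safe_position_py : String × Int := ("[b]x[/b]", 8)

def Spec_is_safe_position_py (text : String) (pos : Int) (out : Bool) : Prop :=
  out = is_safe_position_py_alt text pos
instance (text : String) (pos : Int) (out : Bool) : Decidable (Spec_is_safe_position_py text pos out) := by
  unfold Spec_is_safe_position_py; infer_instance

-- ===== CLAIM (what is proved, stated in full; the proofs are below) =====
def Claim_equal_is_safe_position_py : Prop := ∀ (text : String) (pos : Int), Dom_is_safe_position_py text pos → Pre_is_safe_position_py text pos → Spec_is_safe_position_py text pos (is_safe_position_py text pos)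
-- ===== LEMMAS AND PROOFS =====

-- the continuation of B's tokenizer after an emitted token: `l` is the rest of the text
-- from the closing ']' (at absolute position k) on; states the unfolding lemmas of pvTokens
def pvAfter (l : List Char) (k : Nat) : List (Nat × Bool × List Char) :=
  match l with
  | _ :: r2 => pvTokens r2 (k + 1)
  | [] => []

theorem pvDropWhile_head_false {p : Char → Bool} :
    ∀ (l : List Char) (x : Char) (r : List Char), l.dropWhile p = x :: r → p x = false := by
  intro l
  induction l with
  | nil => simp [List.dropWhile]
  | cons a t ih =>
    intro x r h
    by_cases hp : p a
    · rw [List.dropWhile_cons_of_pos hp] at h; exact ih x r h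
    · rw [List.dropWhile_cons_of_neg hp] at h
      cases h; simpa using hp

theorem pvDropWhile_eq_drop (p : Char → Bool) (l : List Char) :
    l.dropWhile p = l.drop (l.takeWhile p).length := by
  have h2 := List.drop_left (l₁ := l.takeWhile p) (l₂ := l.dropWhile p)
  rw [List.takeWhile_append_dropWhile] at h2
  exact h2.symm

theorem pvTakeWhile_length_le (p : Char → Bool) (l : List Char) :
    (l.takeWhile p).length ≤ l.length := by
  have h := congrArg List.length (List.takeWhile_append_dropWhile (p := p) (l := l))
  rw [List.length_append] at h
  omega

theorem pvScanTag_eq (cs : List Char) (j : Nat) :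
    pvScanTag cs j =
      ((cs.drop j).takeWhile (· ≠ ']'),
       j + ((cs.drop j).takeWhile (· ≠ ']')).length) := by
  fun_induction pvScanTag with
  | case1 j h hj =>
    rw [List.drop_eq_getElem_cons h, hj]
    simp
  | case2 j h hj ih =>
    rw [List.drop_eq_getElem_cons h]
    rw [List.takeWhile_cons_of_pos (by simpa using hj)]
    simp [ih, Prod.ext_iff]
    omega
  | case3 j h =>
    rw [List.drop_eq_nil_of_le (by omega)]
    simp

theorem pvTokens_nil (idx : Nat) : pvTokens [] idx = [] := by simp [pvTokens]

theorem pvTokens_other (c : Char) (rest : List Char) (idx : Nat) (h : c ≠ '[') :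
    pvTokens (c :: rest) idx = pvTokens rest (idx + 1) := by
  conv_lhs => rw [pvTokens.eq_def]
  simp [h]

theorem pvTokens_close (r : List Char) (idx : Nat) :
    pvTokens ('[' :: '/' :: r) idx =
      (idx, true, r.takeWhile (· ≠ ']')) ::
        pvAfter (r.dropWhile (· ≠ ']')) (idx + 2 + (r.takeWhile (· ≠ ']')).length) := by
  conv_lhs => rw [pvTokens.eq_def]
  simp only []
  cases hdw : r.dropWhile (· ≠ ']') with
  | nil => simp [pvAfter]
  | cons x r2 =>
    simp only [pvAfter]
    rw [show idx + 2 + (r.takeWhile (· ≠ ']')).length + 1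
          = idx + 3 + (r.takeWhile (· ≠ ']')).length from by omega]
    simp

theorem pvTokens_open (rest : List Char) (idx : Nat) (h : rest.head? ≠ some '/') :
    pvTokens ('[' :: rest) idx =
      (idx, false, rest.takeWhile (· ≠ ']')) ::
        pvAfter (rest.dropWhile (· ≠ ']')) (idx + 1 + (rest.takeWhile (· ≠ ']')).length) := by
  conv_lhs => rw [pvTokens.eq_def]
  cases rest with
  | nil => simp [pvAfter, List.dropWhile]
  | cons x rs =>
    have hx : x ≠ '/' := by simp at h; exact h
    split
    · rename_i heq; simp at heq
    · rename_i l2 c2 rest2 heq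
      injection heq with e1 e2
      subst e1; subst e2
      rw [if_pos rfl]
      split
      · rename_i r heq2
        rw [List.cons.injEq] at heq2
        exact absurd heq2.1 hx
      · cases hdw : List.dropWhile (fun c => decide (c ≠ ']')) (x :: rs) with
        | nil => simp [pvAfter]
        | cons y r2 =>
          simp only [pvAfter]
          rw [show idx + 1 + ((x :: rs).takeWhile (· ≠ ']')).length + 1
                = idx + 2 + ((x :: rs).takeWhile (· ≠ ']')).length from by omega]

theorem pvTokens_start_ge_aux (n : Nat) :
    ∀ (l : List Char) (idx : Nat), l.length ≤ n → ∀ t ∈ pvTokens l idx, idx ≤ t.1 := by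
  induction n with
  | zero =>
    intro l idx hl t ht
    have hnil : l = [] := by cases l <;> simp_all
    rw [hnil, pvTokens_nil] at ht
    simp at ht
  | succ n ih =>
    intro l idx hl t ht
    cases l with
    | nil => rw [pvTokens_nil] at ht; simp at ht
    | cons c rest =>
      by_cases hc : c = '['
      · subst hc
        by_cases hslash : rest.head? = some '/'
        · obtain ⟨rs, hrs⟩ : ∃ rs, rest = '/' :: rs := by
            cases rest with
            | nil => simp at hslash
            | cons x rs => simp at hslash; exact ⟨rs, by rw [hslash]⟩
          subst hrs
          rw [pvTokens_close] at ht
          rcases List.mem_cons.mp ht with rfl | hm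
          · simp
          · cases hdw : rs.dropWhile (· ≠ ']') with
            | nil => rw [hdw] at hm; simp [pvAfter] at hm
            | cons y r2 =>
              rw [hdw] at hm; simp only [pvAfter] at hm
              have h1 := List.length_dropWhile_le (p := (· ≠ ']')) rs
              rw [hdw] at h1
              have hlen : r2.length ≤ n := by simp at h1 hl ⊢; omega
              have := ih r2 _ hlen t hm
              omega
        · rw [pvTokens_open rest idx hslash] at ht
          rcases List.mem_cons.mp ht with rfl | hm
          · simp
          · cases hdw : rest.dropWhile (· ≠ ']') with
            | nil => rw [hdw] at hm; simp [pvAfter] at hm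
            | cons y r2 =>
              rw [hdw] at hm; simp only [pvAfter] at hm
              have h1 := List.length_dropWhile_le (p := (· ≠ ']')) rest
              rw [hdw] at h1
              have hlen : r2.length ≤ n := by simp at h1 hl ⊢; omega
              have := ih r2 _ hlen t hm
              omega
      · rw [pvTokens_other c rest idx hc] at ht
        have := ih rest (idx + 1) (by simp at hl; omega) t ht
        omega

theorem pvTokens_start_ge (l : List Char) (idx : Nat) :
    ∀ t ∈ pvTokens l idx, idx ≤ t.1 :=
  pvTokens_start_ge_aux l.length l idx le_rfl

theorem pvStep_close (st : List (List Char)) (i : Nat) (nm : List Char) :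
    pvStep st (i, true, nm) = if st.head? = some nm then st.tail else st := by
  cases st with
  | nil => simp [pvStep]
  | cons top r => by_cases h : top = nm <;> simp [pvStep, h]

theorem pvAfter_eq_tokens (cs : List Char) (j : Nat)
    (h : ∀ x r, cs.drop j = x :: r → x ≠ '[') :
    pvAfter (cs.drop j) j = pvTokens (cs.drop j) j := by
  cases hdj : cs.drop j with
  | nil => rw [pvAfter, pvTokens]
  | cons x r2 =>
    rw [pvAfter, pvTokens_other x r2 j (h x r2 hdj)]

theorem pvMain (n : Nat) : ∀ (cs : List Char) (pos : Int) (st : List (List Char)) (i : Nat),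
    cs.length + 1 - i ≤ n → i ≤ cs.length → pos ≤ (cs.length : Int) →
    pvALoop cs pos st i =
      (((pvTokens (cs.drop i) i).takeWhile (fun t => (t.1 : Int) < pos)).foldl pvStep st).isEmpty := by
  induction n with
  | zero => intro cs pos st i hn hi hpos; omega
  | succ n ih =>
    intro cs pos st i hn hi hpos
    rw [pvALoop]
    by_cases hip : (i : Int) < pos
    · have hilen : i < cs.length := by omega
      have hget : cs[i]? = some cs[i] := List.getElem?_eq_getElem hilen
      have hdrop : cs.drop i = cs[i] :: cs.drop (i + 1) := List.drop_eq_getElem_cons hilen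
      simp only [if_pos hip, hget]
      by_cases hbr : cs[i] = '['
      · simp only [if_pos hbr]
        by_cases hcl : cs[i + 1]? = some '/'
        · -- closing tag
          simp only [if_pos hcl]
          have hi1 : i + 1 < cs.length := (List.getElem?_eq_some_iff.mp hcl).1
          have hc2 : cs[i + 1] = '/' := by
            have := (List.getElem?_eq_some_iff.mp hcl).2; simpa using this
          have hdrop2 : cs.drop (i + 1) = '/' :: cs.drop (i + 2) := by
            rw [List.drop_eq_getElem_cons hi1, hc2]
          rw [hdrop, hbr, hdrop2, pvTokens_close]
          have hscan : pvScanTag cs (i + 2)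
              = ((cs.drop (i + 2)).takeWhile (· ≠ ']'),
                 i + 2 + ((cs.drop (i + 2)).takeWhile (· ≠ ']')).length) := by
            rw [pvScanTag_eq]
          have h1 := pvTakeWhile_length_le (· ≠ ']') (cs.drop (i + 2))
          have h2 : (cs.drop (i + 2)).length = cs.length - (i + 2) := List.length_drop ..
          have hjlen : i + 2 + ((cs.drop (i + 2)).takeWhile (· ≠ ']')).length ≤ cs.length := by
            omega
          have hdw : (cs.drop (i + 2)).dropWhile (· ≠ ']')
              = cs.drop (i + 2 + ((cs.drop (i + 2)).takeWhile (· ≠ ']')).length) := by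
            rw [pvDropWhile_eq_drop, List.drop_drop]
            try congr 1
            try omega
          have hhd : ∀ x r, cs.drop (i + 2 + ((cs.drop (i + 2)).takeWhile (· ≠ ']')).length)
              = x :: r → x ≠ '[' := by
            intro x r hxr
            have := pvDropWhile_head_false (p := (· ≠ ']')) (cs.drop (i + 2)) x r
              (by rw [hdw, hxr])
            simp at this; simp [this]
          rw [List.takeWhile_cons_of_pos (by simpa using hip)]
          rw [List.foldl_cons, pvStep_close, hdw, pvAfter_eq_tokens _ _ hhd]
          simp only [hscan]
          exact ih cs pos _ _ (by omega) hjlen hpos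
        · -- opening tag
          simp only [if_neg hcl]
          have hhead : (cs.drop (i + 1)).head? ≠ some '/' := by
            intro hh
            cases hd1 : cs.drop (i + 1) with
            | nil => rw [hd1] at hh; simp at hh
            | cons x r =>
              rw [hd1] at hh; simp at hh
              have hi1 : i + 1 < cs.length := by
                by_contra hno
                rw [List.drop_eq_nil_of_le (by omega)] at hd1; simp at hd1
              apply hcl
              rw [List.getElem?_eq_getElem hi1]
              rw [List.drop_eq_getElem_cons hi1, List.cons.injEq] at hd1
              simp [hd1.1, hh]
          rw [hdrop, hbr, pvTokens_open _ _ hhead]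
          have hscan : pvScanTag cs (i + 1)
              = ((cs.drop (i + 1)).takeWhile (· ≠ ']'),
                 i + 1 + ((cs.drop (i + 1)).takeWhile (· ≠ ']')).length) := by
            rw [pvScanTag_eq]
          have h1 := pvTakeWhile_length_le (· ≠ ']') (cs.drop (i + 1))
          have h2 : (cs.drop (i + 1)).length = cs.length - (i + 1) := List.length_drop ..
          have hjlen : i + 1 + ((cs.drop (i + 1)).takeWhile (· ≠ ']')).length ≤ cs.length := by
            omega
          have hdw : (cs.drop (i + 1)).dropWhile (· ≠ ']')
              = cs.drop (i + 1 + ((cs.drop (i + 1)).takeWhile (· ≠ ']')).length) := by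
            rw [pvDropWhile_eq_drop, List.drop_drop]
            try congr 1
            try omega
          have hhd : ∀ x r, cs.drop (i + 1 + ((cs.drop (i + 1)).takeWhile (· ≠ ']')).length)
              = x :: r → x ≠ '[' := by
            intro x r hxr
            have := pvDropWhile_head_false (p := (· ≠ ']')) (cs.drop (i + 1)) x r
              (by rw [hdw, hxr])
            simp at this; simp [this]
          rw [List.takeWhile_cons_of_pos (by simpa using hip)]
          rw [List.foldl_cons, hdw, pvAfter_eq_tokens _ _ hhd]
          simp only [hscan]
          have hstep : ∀ nm, pvStep st (i, false, nm) = nm :: st := by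
            intro nm; simp [pvStep]
          rw [hstep]
          exact ih cs pos _ _ (by omega) hjlen hpos
      · simp only [if_neg hbr]
        rw [hdrop, pvTokens_other _ _ _ hbr]
        exact ih cs pos st (i + 1) (by omega) (by omega) hpos
    · simp only [if_neg hip]
      cases htk : pvTokens (cs.drop i) i with
      | nil => simp
      | cons t tl =>
        have hge : i ≤ t.1 := pvTokens_start_ge (cs.drop i) i t (by rw [htk]; exact List.mem_cons_self ..)
        have hnp : ¬ ((t.1 : Int) < pos) := by push_cast; omega
        rw [List.takeWhile_cons_of_neg (by simpa using hnp)]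
        simp

-- ===== VERDICT (by name: the statement is the Claim_ definition above) =====
theorem is_safe_position_py_spec : Claim_equal_is_safe_position_py := by
  intro text pos _ hpre
  unfold Spec_is_safe_position_py is_safe_position_py is_safe_position_py_alt
  have := pvMain (text.toList.length + 1) text.toList pos [] 0 (by omega) (by omega)
    (by unfold Pre_is_safe_position_py at hpre; simpa using hpre)
  simpa using this
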